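-- pv_equiv track=rewrite | github.com/goodwordalchemy/coding_competitions | kickstartG2019/the_equation.py | the_equation_slow
-- ===== SOURCE A (Python) =====
-- def the_equation_slow(M, A):
--     top = max(M, max(A))
--     for i in reversed(range(top+1)):
--         total = 0
--         for a in A:
--             total += i ^ a
--         if total <= M:
--             return i
--     return -1
-- ===== SOURCE B (Python) =====
-- def the_equation_slow(M, A):
--     # Per-bit weight table built once, so the inner scan over A disappears:
--     # sum(i ^ a for a in A) == sum(A) + sum(w[b] for set bits b of i).
--     top = max(M, max(A))
--     if top < 0:
--         return -1
--     base = sum(A)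
--     cs = [(a if a >= 0 else -1 - a) for a in A]
--     nb = max([top, 1] + cs).bit_length()
--     w = [(1 << b) * sum((1 if a >= 0 else -1) * (1 - 2 * ((c >> b) & 1))
--                         for a, c in zip(A, cs))
--          for b in range(nb)]
--     for i in range(top, -1, -1):
--         total = base + sum(w[b] for b in range(nb) if (i >> b) & 1)
--         if total <= M:
--             return i
--     return -1
-- ===== Notes on version B (the rewrite author's own statement) =====
-- stated objective: alternative
-- what changed: B precomputes a per-bit weight table from A once (using sum(i^a for a in A) = sum(A) + sum of weights of i's set bits, with negatives handled via i^a = -1-(i^(-1-a))), so the downward search evaluates each candidate in O(bits) instead of rescanning all of A; it trades an O(n*bits) preprocessing pass for an O(bits) inner step.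
import Mathlib
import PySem

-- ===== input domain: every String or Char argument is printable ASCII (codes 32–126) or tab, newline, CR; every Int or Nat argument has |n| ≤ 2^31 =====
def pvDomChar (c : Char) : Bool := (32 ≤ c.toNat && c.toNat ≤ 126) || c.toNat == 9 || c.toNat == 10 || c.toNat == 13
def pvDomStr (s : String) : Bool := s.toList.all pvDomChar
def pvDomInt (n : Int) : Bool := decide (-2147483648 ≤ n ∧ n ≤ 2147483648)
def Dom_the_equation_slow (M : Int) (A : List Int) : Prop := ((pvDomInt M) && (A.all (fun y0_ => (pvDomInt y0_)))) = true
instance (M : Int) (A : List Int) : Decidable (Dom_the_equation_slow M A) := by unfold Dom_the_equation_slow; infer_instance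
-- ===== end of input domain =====

-- B replaces A's inner scan over the whole list at every candidate i by a per-bit weight
-- table built once, using sum(i ^ a for a in A) = sum(A) + sum of weights of the set bits of i
-- (an alternative algorithm: it trades one O(n*bits) preprocessing pass for an O(bits) inner step).

-- ===== PORT A =====
-- total = 0; for a in A: total += i ^ a
def pyTotal (A : List Int) (i : Int) : Int :=
  A.foldl (fun total a => total + PySem.Int.bxor i a) 0

-- for i in reversed(range(top+1)): if total <= M: return i   (k = current i, counting down)
def pyLoopA (M : Int) (A : List Int) : Nat → Int
  | 0 => if pyTotal A 0 ≤ M then 0 else -1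
  | k+1 => if pyTotal A ((k+1 : Nat) : Int) ≤ M then ((k+1 : Nat) : Int) else pyLoopA M A k

def the_equation_slow (M : Int) (A : List Int) : Int :=
  match PySem.List.max? A (fun x => x) with
  | none => 0    -- max(A) raises ValueError on A = []; excluded by Pre_
  | some mA =>
    let top := max M mA
    if top < 0 then -1 else pyLoopA M A top.toNat

-- ===== PORT B =====
-- (a if a >= 0 else -1 - a)
def altC (a : Int) : Int := if 0 ≤ a then a else -1 - a

-- w = [(1 << b) * sum((1 if a >= 0 else -1) * (1 - 2 * ((c >> b) & 1)) for a, c in zip(A, cs)) for b in range(nb)]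
def altW (A cs : List Int) (nb : Nat) : List Int :=
  (List.range nb).map (fun (b : Nat) =>
    ((1:Int) <<< b) * ((A.zip cs).foldl
      (fun (s : Int) (p : Int × Int) => s + (if 0 ≤ p.1 then (1:Int) else -1) * (1 - 2 * PySem.Int.band (p.2 >>> b) 1)) 0))

-- total = base + sum(w[b] for b in range(nb) if (i >> b) & 1)
def altTotal (base : Int) (w : List Int) (nb : Nat) (i : Int) : Int :=
  base + (List.range nb).foldl
    (fun (s : Int) (b : Nat) => if PySem.Int.band (i >>> b) 1 ≠ 0 then s + w.getD b 0 else s) 0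

-- for i in range(top, -1, -1): ...
def pyLoopB (M base : Int) (w : List Int) (nb : Nat) : Nat → Int
  | 0 => if altTotal base w nb 0 ≤ M then 0 else -1
  | k+1 => if altTotal base w nb ((k+1 : Nat) : Int) ≤ M then ((k+1 : Nat) : Int) else pyLoopB M base w nb k

def the_equation_slow_alt (M : Int) (A : List Int) : Int :=
  match PySem.List.max? A (fun x => x) with
  | none => 0    -- max(A) raises ValueError on A = []; excluded by Pre_
  | some mA =>
    let top := max M mA
    if top < 0 then -1
    else
      let base := A.sum
      let cs := A.map altC
      let nb := PySem.Int.bitLength (((1:Int) :: cs).foldl max top)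
      pyLoopB M base (altW A cs nb) nb top.toNat

-- ===== PRECONDITION & SPEC =====
-- Python A raises ValueError (max of an empty sequence) on A = []; Pre_ excludes exactly that.
def Pre_the_equation_slow (M : Int) (A : List Int) : Prop := A ≠ []
instance (M : Int) (A : List Int) : Decidable (Pre_the_equation_slow M A) := by
  unfold Pre_the_equation_slow; infer_instance
def pvWitness_the_equation_slow : Int × List Int := (5, [1, 2, 3])

def Spec_the_equation_slow (M : Int) (A : List Int) (out : Int) : Prop := out = the_equation_slow_alt M A
instance (M : Int) (A : List Int) (out : Int) : Decidable (Spec_the_equation_slow M A out) := by unfold Spec_the_equation_slow; infer_instance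

-- ===== CLAIM (what is proved, stated in full; the proofs are below) =====
def Claim_equal_the_equation_slow : Prop := ∀ (M : Int) (A : List Int), Dom_the_equation_slow M A → Pre_the_equation_slow M A → Spec_the_equation_slow M A (the_equation_slow M A)

-- ===== LEMMAS AND PROOFS =====

-- the b-th bit of a nonnegative integer, as a natural number
def cbit (c : Int) (b : Nat) : Nat := (c.toNat >>> b) % 2

-- binary expansion, truncated to nb bits (Nat level)
theorem sumBitsNat (i : Nat) : ∀ nb : Nat,
    ((List.range nb).map (fun b => 2^b * ((i >>> b) % 2))).sum = i % 2^nb := by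
  intro nb
  induction nb with
  | zero => simp [Nat.mod_one]
  | succ n ih =>
    rw [List.range_succ, List.map_append, List.sum_append, ih]
    simp [Nat.shiftRight_eq_div_pow, Nat.mod_pow_succ]

-- one bit of a xor is the xor of the bits
theorem bitXor (x y b : Nat) :
    ((x ^^^ y) >>> b) % 2 = ((x >>> b) % 2 + (y >>> b) % 2) % 2 := by
  have h := Nat.testBit_xor x y b
  have e : ∀ z : Nat, Nat.testBit z b = decide ((z >>> b) % 2 = 1) := fun z => by
    simp [Nat.testBit]
  rw [e, e, e] at h
  simp only [Nat.shiftRight_eq_div_pow] at h ⊢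
  have h1 : (x >>> b) % 2 < 2 := Nat.mod_lt _ (by norm_num)
  have h2 : (y >>> b) % 2 < 2 := Nat.mod_lt _ (by norm_num)
  have h3 : ((x ^^^ y) >>> b) % 2 < 2 := Nat.mod_lt _ (by norm_num)
  simp only [Nat.shiftRight_eq_div_pow] at h1 h2 h3
  by_cases e1 : (x / 2^b) % 2 = 1 <;> by_cases e2 : (y / 2^b) % 2 = 1 <;>
    simp [e1, e2] at h <;> omega

-- PySem xor with a negative second argument
theorem bxor_negSucc (m k : Nat) :
    PySem.Int.bxor (m : Int) (Int.negSucc k) = -((m ^^^ k : Nat) : Int) - 1 := by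
  simp [PySem.Int.bxor]

-- Int-level xor expansion for nonnegative arguments below 2^nb
theorem natXorExpand (nb i c : Nat) (hi : i < 2^nb) (hc : c < 2^nb) :
    ((i ^^^ c : Nat) : Int) = (c : Int) +
      ((List.range nb).map (fun b =>
        if (i >>> b) % 2 = 1 then (2^b : Int) * (1 - 2 * (((c >>> b) % 2 : Nat) : Int)) else 0)).sum := by
  have hx : i ^^^ c < 2^nb := Nat.xor_lt_two_pow hi hc
  have cast_sum : ∀ (f : Nat → Nat) (n : Nat), (n = ((List.range nb).map f).sum) →
      (n : Int) = ((List.range nb).map (fun b => ((f b : Nat) : Int))).sum := by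
    intro f n hn
    subst hn
    rw [Nat.cast_list_sum, List.map_map]
    rfl
  have e1 : ((i ^^^ c : Nat) : Int)
      = ((List.range nb).map (fun b => ((2^b * (((i ^^^ c) >>> b) % 2) : Nat) : Int))).sum := by
    apply cast_sum
    rw [sumBitsNat, Nat.mod_eq_of_lt hx]
  have e2 : ((c : Nat) : Int)
      = ((List.range nb).map (fun b => ((2^b * ((c >>> b) % 2) : Nat) : Int))).sum := by
    apply cast_sum
    rw [sumBitsNat, Nat.mod_eq_of_lt hc]
  rw [e1, e2, ← PySem.List.sum_map_add_int]
  apply congrArg List.sum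
  apply List.map_congr_left
  intro b _
  have hcb : (c >>> b) % 2 < 2 := Nat.mod_lt _ (by norm_num)
  have hib : (i >>> b) % 2 < 2 := Nat.mod_lt _ (by norm_num)
  rw [bitXor]
  by_cases e : (i >>> b) % 2 = 1
  · rw [e]
    have : (c >>> b) % 2 = 0 ∨ (c >>> b) % 2 = 1 := by omega
    rcases this with e' | e' <;> simp [e']
  · have e0 : (i >>> b) % 2 = 0 := by omega
    rw [e0]
    simp [Nat.mod_eq_of_lt hcb]

-- per-element expansion, both signs of a
theorem sum_neg_own (l : List Int) : -(l.sum) = (l.map (fun x => -x)).sum := by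
  induction l with
  | nil => simp
  | cons x t ih => simp [ih]; ring

theorem elemExpand (nb : Nat) (a : Int) (i : Nat) (hi : i < 2^nb)
    (hc : (altC a).toNat < 2^nb) :
    PySem.Int.bxor (i : Int) a = a +
      ((List.range nb).map (fun b =>
        if (i >>> b) % 2 = 1 then
          (2^b : Int) * ((if 0 ≤ a then (1:Int) else -1) * (1 - 2 * (cbit (altC a) b : Int)))
        else 0)).sum := by
  by_cases ha : 0 ≤ a
  · have hca : altC a = a := by simp [altC, ha]
    rw [hca] at hc
    have hb : PySem.Int.bxor (i : Int) a = ((i ^^^ a.toNat : Nat) : Int) := by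
      conv_lhs => rw [← Int.toNat_of_nonneg ha]
      exact PySem.Int.bxor_natCast i a.toNat
    rw [hb, natXorExpand nb i a.toNat hi hc]
    rw [Int.toNat_of_nonneg ha]
    apply congrArg (fun s => a + s)
    apply congrArg List.sum
    apply List.map_congr_left
    intro b _
    simp only [cbit, hca, if_pos ha, one_mul]
  · have hca : altC a = -1 - a := by simp [altC, ha]
    have hnn : (0:Int) ≤ altC a := by rw [hca]; omega
    have hcc : ((altC a).toNat : Int) = -1 - a := by rw [Int.toNat_of_nonneg hnn, hca]
    have hak : a = Int.negSucc (altC a).toNat := by rw [Int.negSucc_eq]; omega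
    have hb : PySem.Int.bxor (i : Int) a = -(((i ^^^ (altC a).toNat : Nat) : Int)) - 1 := by
      conv_lhs => rw [hak]
      exact bxor_negSucc i (altC a).toNat
    rw [hb, natXorExpand nb i (altC a).toNat hi hc, hcc]
    rw [neg_add, sum_neg_own, List.map_map]
    have key : ∀ s t : Int, s = t → -(-1 - a) + s - 1 = a + t := by
      intro s t h; rw [h]; ring
    apply key
    apply congrArg List.sum
    apply List.map_congr_left
    intro b _
    by_cases e : (i >>> b) % 2 = 1 <;> simp [Function.comp, e, cbit, ha] <;> ring

-- swap a list-sum of range-sums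
theorem sum_swap {alpha : Type} (A : List alpha) (nb : Nat) (F : alpha → Nat → Int) :
    (A.map (fun a => ((List.range nb).map (F a)).sum)).sum
      = ((List.range nb).map (fun b => (A.map (fun a => F a b)).sum)).sum := by
  induction A with
  | nil => simp
  | cons x t ih =>
    simp only [List.map_cons, List.sum_cons, ih]
    rw [PySem.List.sum_map_add_int]

-- a guarded accumulating fold is the sum of the guarded terms
theorem foldl_if_add {beta : Type} (l : List beta) (p : beta → Prop) [DecidablePred p]
    (f : beta → Int) (s : Int) :
    l.foldl (fun s b => if p b then s + f b else s) s
      = s + (l.map (fun b => if p b then f b else 0)).sum := by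
  induction l generalizing s with
  | nil => simp
  | cons x t ih =>
    rw [List.foldl_cons, ih]
    simp only [List.map_cons, List.sum_cons]
    split_ifs <;> ring

-- the Python '&' bit test on a nonnegative int is cbit
theorem band_bit (c : Int) (hc : 0 ≤ c) (b : Nat) :
    PySem.Int.band (c >>> b) 1 = ((cbit c b : Nat) : Int) := by
  rw [← Int.toNat_of_nonneg hc]
  have sh : ((c.toNat : Nat) : Int) >>> b = (((c.toNat >>> b : Nat) : Nat) : Int) := rfl
  rw [sh]
  have : ((1 : Int)) = (((1 : Nat) : Nat) : Int) := rfl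
  rw [this, PySem.Int.band_natCast, Nat.and_one_is_mod]
  simp [cbit]

theorem altC_nonneg (a : Int) : 0 ≤ altC a := by
  unfold altC; split <;> omega

theorem mul_sum_own (c : Int) (l : List Int) : c * l.sum = (l.map (fun x => c * x)).sum := by
  induction l with
  | nil => simp
  | cons x t ih => simp [List.sum_cons, mul_add, ih]

-- A's per-candidate total equals B's table-driven total
theorem totalEq (A : List Int) (nb k : Nat) (hk : k < 2^nb)
    (hcs : ∀ a ∈ A, (altC a).toNat < 2^nb) :
    pyTotal A (k : Int) = altTotal A.sum (altW A (A.map altC) nb) nb (k : Int) := by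
  unfold pyTotal altTotal
  rw [PySem.List.foldl_add, foldl_if_add]
  simp only [zero_add]
  have hmap : A.map (fun a => PySem.Int.bxor (k : Int) a)
      = A.map (fun a => a + ((List.range nb).map (fun b =>
          if (k >>> b) % 2 = 1 then
            (2^b : Int) * ((if 0 ≤ a then (1:Int) else -1) * (1 - 2 * (cbit (altC a) b : Int)))
          else 0)).sum) :=
    List.map_congr_left (fun a hmem => elemExpand nb a k hk (hcs a hmem))
  rw [hmap, PySem.List.sum_map_add_int, List.map_id', sum_swap]
  apply congrArg (fun s => A.sum + s)
  apply congrArg List.sum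
  apply List.map_congr_left
  intro b hb
  have hblt : b < nb := List.mem_range.mp hb
  -- the Python truthiness test '(i >> b) & 1' is the bit test
  have hcond : (PySem.Int.band ((k : Int) >>> b) 1 ≠ 0) ↔ ((k >>> b) % 2 = 1) := by
    have : PySem.Int.band ((k : Int) >>> b) 1 = ((cbit (k : Int) b : Nat) : Int) :=
      band_bit (k : Int) (by positivity) b
    rw [this]
    unfold cbit
    simp only [Int.toNat_natCast]
    constructor
    · intro h
      have h2 : (k >>> b) % 2 < 2 := Nat.mod_lt _ (by norm_num)
      omega
    · intro h; rw [h]; norm_num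
  -- the weight table entry
  have hentry : (altW A (A.map altC) nb).getD b 0
      = ((1:Int) <<< b) * ((A.zip (A.map altC)).foldl
        (fun (s : Int) (p : Int × Int) =>
          s + (if 0 ≤ p.1 then (1:Int) else -1) * (1 - 2 * PySem.Int.band (p.2 >>> b) 1)) 0) := by
    simp [altW, hblt, List.getElem_range]
  have hz : (A.map (fun x => x)).zip (A.map altC) = A.map (fun a => (a, altC a)) :=
    List.zip_map'
  rw [List.map_id'] at hz
  have hw : (altW A (A.map altC) nb).getD b 0
      = (2^b : Int) * (A.map (fun a =>
          (if 0 ≤ a then (1:Int) else -1) * (1 - 2 * (cbit (altC a) b : Int)))).sum := by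
    rw [hentry, hz, List.foldl_map, PySem.List.foldl_add, zero_add]
    have hsh : ((1:Int) <<< b) = 2^b := by simp [Int.shiftLeft_eq]
    rw [hsh]
    apply congrArg (fun s => (2^b : Int) * s)
    apply congrArg List.sum
    apply List.map_congr_left
    intro a _
    rw [band_bit (altC a) (altC_nonneg a) b]
  rw [if_congr hcond rfl rfl, hw]
  by_cases ek : (k >>> b) % 2 = 1
  · rw [if_pos ek, mul_sum_own, List.map_map]
    simp only [ek, if_true]
    rfl
  · rw [if_neg ek]
    simp [ek]

-- both downward loops agree when the totals agree at every candidate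
theorem loopsEq (M base : Int) (A : List Int) (w : List Int) (nb : Nat) :
    ∀ K : Nat, (∀ k : Nat, k ≤ K → pyTotal A (k : Int) = altTotal base w nb (k : Int)) →
      pyLoopA M A K = pyLoopB M base w nb K := by
  intro K
  induction K with
  | zero =>
    intro h
    have h0 := h 0 (Nat.le_refl 0)
    simp only [pyLoopA, pyLoopB]
    rw [show ((0 : Nat) : Int) = (0 : Int) from rfl] at h0
    rw [h0]
  | succ n ih =>
    intro h
    simp only [pyLoopA, pyLoopB]
    rw [h (n+1) (Nat.le_refl _)]
    split_ifs with hcond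
    · rfl
    · exact ih (fun k hk => h k (Nat.le_succ_of_le hk))

theorem mainEq (M : Int) (A : List Int) (hA : A ≠ []) :
    the_equation_slow M A = the_equation_slow_alt M A := by
  obtain ⟨a, t, rfl⟩ := List.exists_cons_of_ne_nil hA
  unfold the_equation_slow the_equation_slow_alt
  rw [PySem.List.max?_id_cons]
  by_cases htop : max M (t.foldl max a) < 0
  · simp only [htop, if_true]
  · simp only [htop, if_false]
    apply loopsEq
    intro k hk
    have hmx1 : max M (t.foldl max a) ≤ (((1:Int) :: (a :: t).map altC).foldl max (max M (t.foldl max a))) :=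
      (PySem.List.le_foldl_max ((1:Int) :: (a :: t).map altC) (max M (t.foldl max a))).1
    have hpow := PySem.Int.lt_two_pow_bitLength
      ((((1:Int) :: (a :: t).map altC).foldl max (max M (t.foldl max a))))
    apply totalEq
    · have h1 : k ≤ (max M (t.foldl max a)).toNat := hk
      have h2 : (max M (t.foldl max a)).toNat
          ≤ ((((1:Int) :: (a :: t).map altC).foldl max (max M (t.foldl max a)))).natAbs := by
        omega
      exact Nat.lt_of_le_of_lt (le_trans h1 h2) hpow
    · intro x hx
      have hmem : altC x ∈ (a :: t).map altC := List.mem_map_of_mem hx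
      have h3 := (PySem.List.le_foldl_max ((1:Int) :: (a :: t).map altC)
        (max M (t.foldl max a))).2 (altC x) (List.mem_cons_of_mem _ hmem)
      have h4 : 0 ≤ altC x := altC_nonneg x
      have h5 : (altC x).toNat
          ≤ ((((1:Int) :: (a :: t).map altC).foldl max (max M (t.foldl max a)))).natAbs := by
        omega
      exact Nat.lt_of_le_of_lt h5 hpow

-- ===== VERDICT (by name: the statement is the Claim_ definition above) =====
theorem the_equation_slow_spec : Claim_equal_the_equation_slow := by
  intro M A _ hPre
  unfold Spec_the_equation_slow
  exact mainEq M A hPre
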